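-- pv_equiv track=rewrite | github.com/grasshopperTrainer/coding_practice | baekjoon/accepted/1927 최소 힙_heapq.py | solution
-- ===== SOURCE A (Python) =====
-- import heapq
--
-- def solution(nums):
--     answer = []
--     heap = []
--     for n in nums:
--         if n == 0:
--             if not heap:
--                 answer.append(0)
--             else:
--                 answer.append(heapq.heappop(heap))
--         else:
--             heapq.heappush(heap, n)
--
--     return answer
-- ===== SOURCE B (Python) =====
-- def solution(nums):
--     answer = []
--     pool = []  # kept sorted ascending; minimum is pool[0]
--     for n in nums:
--         if n == 0:
--             if not pool:
--                 answer.append(0)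
--             else:
--                 answer.append(pool.pop(0))
--         else:
--             i = 0
--             while i < len(pool) and pool[i] <= n:
--                 i += 1
--             pool.insert(i, n)
--     return answer
-- ===== Notes on version B (the rewrite author's own statement) =====
-- stated objective: alternative
-- what changed: Replaces the binary heap (sift-up/sift-down) with a list kept fully sorted by ordered insertion, so extract-min becomes pop of the front element instead of heap pop with re-sifting.
import Mathlib
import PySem

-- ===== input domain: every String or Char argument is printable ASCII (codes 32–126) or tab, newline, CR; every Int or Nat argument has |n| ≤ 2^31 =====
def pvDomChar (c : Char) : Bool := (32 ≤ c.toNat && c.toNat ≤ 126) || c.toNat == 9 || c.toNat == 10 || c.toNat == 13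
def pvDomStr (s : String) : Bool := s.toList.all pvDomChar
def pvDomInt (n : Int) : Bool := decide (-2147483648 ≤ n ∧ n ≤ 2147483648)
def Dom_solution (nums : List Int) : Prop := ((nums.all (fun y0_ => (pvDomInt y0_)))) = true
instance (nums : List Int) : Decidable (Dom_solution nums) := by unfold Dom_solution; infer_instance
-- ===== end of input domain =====

-- B keeps a fully sorted list (ordered insertion, pop front) instead of A's binary heap; alternative data structure, equivalence of the produced answers is proved.

-- ===== PORT A =====
-- A uses heapq; its heappush/heappop (CPython _siftdown/_siftup) are transliterated here.
-- In-range list reads are ported with getD 0 (Python would raise only out of range, which A never does).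

-- CPython heapq._siftdown(heap, 0, pos) with newitem held out of the list.
def siftdownA (a : List Int) (newitem : Int) (pos : Nat) : List Int :=
  if pos = 0 then a.set pos newitem
  else if newitem < a.getD ((pos - 1) / 2) 0 then
    siftdownA (a.set pos (a.getD ((pos - 1) / 2) 0)) newitem ((pos - 1) / 2)
  else a.set pos newitem
termination_by pos
decreasing_by omega

-- child selection of CPython heapq._siftup: the right child when it exists and is not greater
def chooseChild (a : List Int) (endpos : Nat) (pos : Nat) : Nat :=
  if 2 * pos + 2 < endpos ∧ ¬ (a.getD (2 * pos + 1) 0 < a.getD (2 * pos + 2) 0) then 2 * pos + 2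
  else 2 * pos + 1

-- CPython heapq._siftup inner while-loop (startpos = 0).
def siftupLoopA (a : List Int) (endpos : Nat) (newitem : Int) (pos : Nat) : List Int :=
  if 2 * pos + 1 < endpos then
    siftupLoopA (a.set pos (a.getD (chooseChild a endpos pos) 0)) endpos newitem
      (chooseChild a endpos pos)
  else
    -- heap[pos] = newitem; _siftdown(heap, 0, pos)
    siftdownA (a.set pos newitem) newitem pos
termination_by endpos - pos
decreasing_by unfold chooseChild; split <;> omega

def siftupA (a : List Int) (pos : Nat) : List Int :=
  siftupLoopA a a.length (a.getD pos 0) pos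

-- heapq.heappush: append, then sift the new item up.
def heappushA (h : List Int) (n : Int) : List Int :=
  siftdownA (h ++ [n]) n h.length

-- heapq.heappop: pop last; if heap still nonempty, move it to the root and sift down.
def heappopA (h : List Int) : Int × List Int :=
  if h.dropLast.isEmpty then (h.getLast?.getD 0, h.dropLast)
  else (h.dropLast.getD 0 0, siftupA (h.dropLast.set 0 (h.getLast?.getD 0)) 0)


-- the loop body of A's for-loop
def stepA (st : List Int × List Int) (n : Int) : List Int × List Int :=
  if n = 0 then
    if st.2.isEmpty then (st.1 ++ [0], st.2)
    else
      let p := heappopA st.2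
      (st.1 ++ [p.1], p.2)
  else (st.1, heappushA st.2 n)

def solution (nums : List Int) : List Int :=
  (nums.foldl stepA ([], [])).1

-- ===== PORT B =====
-- Source B's while-loop scans left to right past elements ≤ n and inserts n there.
def insertSortedB (s : List Int) (n : Int) : List Int :=
  match s with
  | [] => [n]
  | x :: xs => if x ≤ n then x :: insertSortedB xs n else n :: x :: xs


-- the loop body of B's for-loop
def stepB (st : List Int × List Int) (n : Int) : List Int × List Int :=
  if n = 0 then
    match st.2 with
    | [] => (st.1 ++ [0], ([] : List Int))
    | x :: xs => (st.1 ++ [x], xs)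
  else (st.1, insertSortedB st.2 n)

def solution_alt (nums : List Int) : List Int :=
  (nums.foldl stepB ([], [])).1

-- ===== PRECONDITION & SPEC =====
def Spec_solution (nums : List Int) (out : List Int) : Prop := out = solution_alt nums
instance (nums : List Int) (out : List Int) : Decidable (Spec_solution nums out) := by unfold Spec_solution; infer_instance

-- ===== CLAIM (what is proved, stated in full; the proofs are below) =====
def Claim_equal_solution : Prop := ∀ (nums : List Int), Dom_solution nums → Spec_solution nums (solution nums)

-- ===== LEMMAS AND PROOFS =====

-- the binary-heap order property on the array representation
def IsHeap (a : List Int) : Prop :=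
  ∀ c, c < a.length → 0 < c → a.getD ((c - 1) / 2) 0 ≤ a.getD c 0

theorem getD_set (a : List Int) (i j : Nat) (v : Int) :
    (a.set i v).getD j 0 = if i = j ∧ j < a.length then v else a.getD j 0 := by
  simp only [List.getD_eq_getElem?_getD, List.getElem?_set]
  by_cases hij : i = j
  · subst hij
    by_cases hl : i < a.length
    · simp [hl]
    · have hnone : a[i]? = none := List.getElem?_eq_none_iff.2 (by omega)
      simp [hl, hnone]
  · simp [hij]

theorem count_set (a : List Int) (i : Nat) (hi : i < a.length) (v x : Int) :
    (a.set i v).count x + (if a.getD i 0 = x then 1 else 0)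
      = a.count x + (if v = x then 1 else 0) := by
  rw [List.set_eq_take_append_cons_drop, if_pos hi]
  conv_rhs => rw [show a = a.take i ++ a.drop i from (List.take_append_drop i a).symm,
    show a.drop i = a.getD i 0 :: a.drop (i + 1) by
      rw [List.getD_eq_getElem _ _ hi]; exact (List.getElem_cons_drop hi).symm]
  simp [List.count_append, List.count_cons]
  split <;> split <;> omega

theorem perm_set_set (a : List Int) (i j : Nat) (hij : i ≠ j)
    (hi : i < a.length) (hj : j < a.length) (x : Int) :
    ((a.set i (a.getD j 0)).set j x).Perm (a.set i x) := by
  rw [List.perm_iff_count]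
  intro y
  have l1 : (a.set i (a.getD j 0)).length = a.length := by simp
  have c1 := count_set a i hi (a.getD j 0) y
  have c2 := count_set (a.set i (a.getD j 0)) j (by omega) x y
  have c3 := count_set a i hi x y
  have e1 : (a.set i (a.getD j 0)).getD j 0 = a.getD j 0 := by
    rw [getD_set]; simp [hij]
  rw [e1] at c2
  split_ifs at c1 c2 c3 <;> omega

theorem siftdownA_perm (pos : Nat) (a : List Int) (ni : Int) (hpos : pos < a.length) :
    (siftdownA a ni pos).Perm (a.set pos ni) := by
  induction pos using Nat.strong_induction_on generalizing a with
  | _ pos ih =>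
    rw [siftdownA]
    by_cases h0 : pos = 0
    · rw [if_pos h0]
    · rw [if_neg h0]
      split_ifs with hlt
      · have hlen : (a.set pos (a.getD ((pos - 1) / 2) 0)).length = a.length := by simp
        refine (ih ((pos - 1) / 2) (by omega) _ (by omega)).trans ?_
        exact perm_set_set a pos ((pos - 1) / 2) (by omega) hpos (by omega) ni
      · exact List.Perm.refl _

theorem siftdownA_heap (pos : Nat) (a : List Int) (ni : Int) (hpos : pos < a.length)
    (H1 : ∀ c, c < a.length → 0 < c → c ≠ pos → a.getD ((c - 1) / 2) 0 ≤ a.getD c 0)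
    (H2 : ∀ c, c < a.length → 0 < c → (c - 1) / 2 = pos → ni ≤ a.getD c 0)
    (H3 : ∀ c, c < a.length → 0 < c → (c - 1) / 2 = pos → 0 < pos →
      a.getD ((pos - 1) / 2) 0 ≤ a.getD c 0) :
    IsHeap (siftdownA a ni pos) := by
  induction pos using Nat.strong_induction_on generalizing a with
  | _ pos ih =>
    rw [siftdownA]
    by_cases h0 : pos = 0
    · rw [if_pos h0]
      subst h0
      intro c hc hc0
      rw [List.length_set] at hc
      have e2 : (a.set 0 ni).getD c 0 = a.getD c 0 := by
        rw [getD_set, if_neg (by omega)]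
      by_cases hq : (c - 1) / 2 = 0
      · have e1 : (a.set 0 ni).getD ((c - 1) / 2) 0 = ni := by
          rw [getD_set, if_pos ⟨by omega, by omega⟩]
        rw [e1, e2]
        exact H2 c hc hc0 hq
      · have e1 : (a.set 0 ni).getD ((c - 1) / 2) 0 = a.getD ((c - 1) / 2) 0 := by
          rw [getD_set, if_neg (by omega)]
        rw [e1, e2]
        exact H1 c hc hc0 (by omega)
    · rw [if_neg h0]
      split_ifs with hlt
      · -- recurse at the parent with the hole moved up
        have hplen : (pos - 1) / 2 < (a.set pos (a.getD ((pos - 1) / 2) 0)).length := by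
          simp; omega
        refine ih ((pos - 1) / 2) (by omega) _ hplen ?_ ?_ ?_
        · -- H1': all edges not entering the new hole
          intro c hc hc0 hcp
          rw [List.length_set] at hc
          by_cases hcpos : c = pos
          · have e1 : (a.set pos (a.getD ((pos - 1) / 2) 0)).getD ((c - 1) / 2) 0
                = a.getD ((pos - 1) / 2) 0 := by
              rw [getD_set, if_neg (by omega), hcpos]
            have e2 : (a.set pos (a.getD ((pos - 1) / 2) 0)).getD c 0
                = a.getD ((pos - 1) / 2) 0 := by
              rw [getD_set, if_pos ⟨hcpos.symm, by omega⟩]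
            rw [e1, e2]
          · have e2 : (a.set pos (a.getD ((pos - 1) / 2) 0)).getD c 0 = a.getD c 0 := by
              rw [getD_set, if_neg (by omega)]
            by_cases hq : (c - 1) / 2 = pos
            · have e1 : (a.set pos (a.getD ((pos - 1) / 2) 0)).getD ((c - 1) / 2) 0
                  = a.getD ((pos - 1) / 2) 0 := by
                rw [getD_set, if_pos ⟨hq.symm, by omega⟩]
              rw [e1, e2]
              exact H3 c hc hc0 hq (by omega)
            · have e1 : (a.set pos (a.getD ((pos - 1) / 2) 0)).getD ((c - 1) / 2) 0
                  = a.getD ((c - 1) / 2) 0 := by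
                rw [getD_set, if_neg (by omega)]
              rw [e1, e2]
              exact H1 c hc hc0 hcpos
        · -- H2': newitem is below every child of the new hole
          intro c hc hc0 hq
          rw [List.length_set] at hc
          by_cases hcpos : c = pos
          · have e2 : (a.set pos (a.getD ((pos - 1) / 2) 0)).getD c 0
                = a.getD ((pos - 1) / 2) 0 := by
              rw [getD_set, if_pos ⟨hcpos.symm, by omega⟩]
            rw [e2]
            exact le_of_lt hlt
          · have e2 : (a.set pos (a.getD ((pos - 1) / 2) 0)).getD c 0 = a.getD c 0 := by
              rw [getD_set, if_neg (by omega)]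
            rw [e2]
            exact le_trans (le_of_lt hlt) (hq ▸ H1 c hc hc0 hcpos)
        · -- H3': grandparent condition at the new hole
          intro c hc hc0 hq hp0
          rw [List.length_set] at hc
          have hgp : a.getD (((pos - 1) / 2 - 1) / 2) 0 ≤ a.getD ((pos - 1) / 2) 0 :=
            H1 ((pos - 1) / 2) (by omega) hp0 (by omega)
          have e1 : (a.set pos (a.getD ((pos - 1) / 2) 0)).getD (((pos - 1) / 2 - 1) / 2) 0
              = a.getD (((pos - 1) / 2 - 1) / 2) 0 := by
            rw [getD_set, if_neg (by omega)]
          rw [e1]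
          by_cases hcpos : c = pos
          · have e2 : (a.set pos (a.getD ((pos - 1) / 2) 0)).getD c 0
                = a.getD ((pos - 1) / 2) 0 := by
              rw [getD_set, if_pos ⟨hcpos.symm, by omega⟩]
            rw [e2]
            exact hgp
          · have e2 : (a.set pos (a.getD ((pos - 1) / 2) 0)).getD c 0 = a.getD c 0 := by
              rw [getD_set, if_neg (by omega)]
            rw [e2]
            exact le_trans hgp (hq ▸ H1 c hc hc0 hcpos)
      · -- place newitem at pos and stop
        intro c hc hc0
        rw [List.length_set] at hc
        by_cases hcpos : c = pos
        · have e1 : (a.set pos ni).getD ((c - 1) / 2) 0 = a.getD ((c - 1) / 2) 0 := by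
            rw [getD_set, if_neg (by omega)]
          have e2 : (a.set pos ni).getD c 0 = ni := by
            rw [getD_set, if_pos ⟨hcpos.symm, by omega⟩]
          rw [e1, e2, hcpos]
          exact le_of_not_gt hlt
        · have e2 : (a.set pos ni).getD c 0 = a.getD c 0 := by
            rw [getD_set, if_neg (by omega)]
          by_cases hq : (c - 1) / 2 = pos
          · have e1 : (a.set pos ni).getD ((c - 1) / 2) 0 = ni := by
              rw [getD_set, if_pos ⟨hq.symm, by omega⟩]
            rw [e1, e2]
            exact H2 c hc hc0 hq
          · have e1 : (a.set pos ni).getD ((c - 1) / 2) 0 = a.getD ((c - 1) / 2) 0 := by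
              rw [getD_set, if_neg (by omega)]
            rw [e1, e2]
            exact H1 c hc hc0 hcpos

theorem chooseChild_lt (a : List Int) (endpos pos : Nat) (h : 2 * pos + 1 < endpos) :
    pos < chooseChild a endpos pos ∧ chooseChild a endpos pos < endpos := by
  unfold chooseChild; split <;> omega

theorem chooseChild_min (a : List Int) (pos : Nat) (h : 2 * pos + 1 < a.length) :
    ∀ d, d < a.length → 0 < d → (d - 1) / 2 = pos →
      a.getD (chooseChild a a.length pos) 0 ≤ a.getD d 0 := by
  intro d hd hd0 hdq
  have hd' : d = 2 * pos + 1 ∨ d = 2 * pos + 2 := by omega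
  unfold chooseChild
  split_ifs with hch
  · rcases hd' with h1 | h1 <;> subst h1
    · exact not_lt.1 hch.2
    · exact le_refl _
  · rcases hd' with h1 | h1 <;> subst h1
    · exact le_refl _
    · by_cases h2 : 2 * pos + 2 < a.length
      · have : a.getD (2 * pos + 1) 0 < a.getD (2 * pos + 2) 0 := by tauto
        exact le_of_lt this
      · omega

theorem siftupLoopA_perm (k : Nat) (a : List Int) (ni : Int) (pos : Nat)
    (hk : k = a.length - pos) (hpos : pos < a.length) :
    (siftupLoopA a a.length ni pos).Perm (a.set pos ni) := by
  induction k using Nat.strong_induction_on generalizing a pos with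
  | _ k ih =>
    rw [siftupLoopA]
    split_ifs with h
    · obtain ⟨hc1, hc2⟩ := chooseChild_lt a a.length pos h
      have hlen : (a.set pos (a.getD (chooseChild a a.length pos) 0)).length = a.length := by
        simp
      have := ih ((a.set pos (a.getD (chooseChild a a.length pos) 0)).length
          - chooseChild a a.length pos) (by omega) _ (chooseChild a a.length pos) rfl (by omega)
      rw [hlen] at this
      exact this.trans
        (perm_set_set a pos (chooseChild a a.length pos) (by omega) hpos (by omega) ni)
    · have hp := siftdownA_perm pos (a.set pos ni) ni (by simpa using hpos)
      rw [List.set_set] at hp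
      exact hp

theorem chooseChild_cases (a : List Int) (endpos pos : Nat) :
    chooseChild a endpos pos = 2 * pos + 1 ∨ chooseChild a endpos pos = 2 * pos + 2 := by
  unfold chooseChild; split <;> omega

theorem siftupLoopA_heap (k : Nat) (a : List Int) (ni : Int) (pos : Nat)
    (hk : k = a.length - pos) (hpos : pos < a.length)
    (E1 : ∀ c, c < a.length → 0 < c → c ≠ pos → (c - 1) / 2 ≠ pos →
      a.getD ((c - 1) / 2) 0 ≤ a.getD c 0)
    (E2 : ∀ c, c < a.length → 0 < c → (c - 1) / 2 = pos → 0 < pos →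
      a.getD ((pos - 1) / 2) 0 ≤ a.getD c 0) :
    IsHeap (siftupLoopA a a.length ni pos) := by
  induction k using Nat.strong_induction_on generalizing a pos with
  | _ k ih =>
    rw [siftupLoopA]
    split_ifs with h
    · obtain ⟨hcg, hcl⟩ := chooseChild_lt a a.length pos h
      have hcc := chooseChild_cases a a.length pos
      have hmin := chooseChild_min a pos h
      have hlen : (a.set pos (a.getD (chooseChild a a.length pos) 0)).length = a.length := by
        simp
      have := ih ((a.set pos (a.getD (chooseChild a a.length pos) 0)).length
          - chooseChild a a.length pos) (by omega) _ (chooseChild a a.length pos) rfl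
          (by omega) ?_ ?_
      · rwa [hlen] at this
      · -- E1 for the moved hole
        intro c hc hc0 hcc0 hq0
        rw [List.length_set] at hc
        by_cases hcpos : c = pos
        · have e1 : (a.set pos (a.getD (chooseChild a a.length pos) 0)).getD ((c - 1) / 2) 0
              = a.getD ((c - 1) / 2) 0 := by
            rw [getD_set, if_neg (by omega)]
          have e2 : (a.set pos (a.getD (chooseChild a a.length pos) 0)).getD c 0
              = a.getD (chooseChild a a.length pos) 0 := by
            rw [getD_set, if_pos ⟨hcpos.symm, by omega⟩]
          rw [e1, e2, hcpos]
          exact E2 (chooseChild a a.length pos) (by omega) (by omega) (by omega) (by omega)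
        · have e2 : (a.set pos (a.getD (chooseChild a a.length pos) 0)).getD c 0
              = a.getD c 0 := by
            rw [getD_set, if_neg (by omega)]
          by_cases hq : (c - 1) / 2 = pos
          · have e1 : (a.set pos (a.getD (chooseChild a a.length pos) 0)).getD ((c - 1) / 2) 0
                = a.getD (chooseChild a a.length pos) 0 := by
              rw [getD_set, if_pos ⟨hq.symm, by omega⟩]
            rw [e1, e2]
            exact hmin c hc hc0 hq
          · have e1 : (a.set pos (a.getD (chooseChild a a.length pos) 0)).getD ((c - 1) / 2) 0
                = a.getD ((c - 1) / 2) 0 := by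
              rw [getD_set, if_neg (by omega)]
            rw [e1, e2]
            exact E1 c hc hc0 hcpos hq
      · -- E2 (grandparent condition) for the moved hole
        intro c hc hc0 hq hcc0
        rw [List.length_set] at hc
        have hq0 : (chooseChild a a.length pos - 1) / 2 = pos := by omega
        have e1 : (a.set pos (a.getD (chooseChild a a.length pos) 0)).getD
            ((chooseChild a a.length pos - 1) / 2) 0
            = a.getD (chooseChild a a.length pos) 0 := by
          rw [getD_set, if_pos ⟨by omega, by omega⟩]
        have e2 : (a.set pos (a.getD (chooseChild a a.length pos) 0)).getD c 0
            = a.getD c 0 := by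
          rw [getD_set, if_neg (by omega)]
        rw [e1, e2]
        exact hq ▸ E1 c hc hc0 (by omega) (by omega)
    · -- leaf reached: place newitem and sift it toward the root
      refine siftdownA_heap pos (a.set pos ni) ni (by simpa using hpos) ?_ ?_ ?_
      · intro c hc hc0 hcpos
        rw [List.length_set] at hc
        have hq : (c - 1) / 2 ≠ pos := by omega
        have e1 : (a.set pos ni).getD ((c - 1) / 2) 0 = a.getD ((c - 1) / 2) 0 := by
          rw [getD_set, if_neg (by omega)]
        have e2 : (a.set pos ni).getD c 0 = a.getD c 0 := by
          rw [getD_set, if_neg (by omega)]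
        rw [e1, e2]
        exact E1 c hc hc0 hcpos hq
      · intro c hc hc0 hq
        rw [List.length_set] at hc
        omega
      · intro c hc hc0 hq hp0
        rw [List.length_set] at hc
        omega

theorem heap_root_min (a : List Int) (hh : IsHeap a) :
    ∀ i, i < a.length → a.getD 0 0 ≤ a.getD i 0 := by
  intro i
  induction i using Nat.strong_induction_on with
  | _ i ih =>
    intro hi
    rcases Nat.eq_zero_or_pos i with h0 | h0
    · subst h0; exact le_refl _
    · exact le_trans (ih ((i - 1) / 2) (by omega) (by omega)) (hh i hi h0)

theorem heappushA_perm (h : List Int) (n : Int) : (heappushA h n).Perm (n :: h) := by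
  unfold heappushA
  have hpos : h.length < (h ++ [n]).length := by simp
  have hp := siftdownA_perm h.length (h ++ [n]) n hpos
  have he : (h ++ [n]).set h.length n = h ++ [n] := by
    rw [List.set_append, if_neg (by omega)]
    simp
  rw [he] at hp
  exact hp.trans (List.perm_append_comm)

theorem heappushA_heap (h : List Int) (n : Int) (hh : IsHeap h) : IsHeap (heappushA h n) := by
  unfold heappushA
  refine siftdownA_heap h.length (h ++ [n]) n (by simp) ?_ ?_ ?_
  · intro c hc hc0 hcp
    rw [List.length_append, List.length_singleton] at hc
    rw [List.getD_append _ _ _ _ (by omega), List.getD_append _ _ _ _ (by omega)]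
    exact hh c (by omega) hc0
  · intro c hc hc0 hq
    rw [List.length_append, List.length_singleton] at hc
    omega
  · intro c hc hc0 hq hp0
    rw [List.length_append, List.length_singleton] at hc
    omega

-- the four facts the main induction needs about a pop from a nonempty heap
theorem heappopA_spec (h : List Int) (hne : h ≠ []) (hh : IsHeap h) :
    (heappopA h).1 = h.getD 0 0 ∧ ((h.getD 0 0) :: (heappopA h).2).Perm h ∧
      IsHeap (heappopA h).2 := by
  have hsplit : h.dropLast ++ [h.getLast hne] = h := List.dropLast_concat_getLast hne
  have hlast : h.getLast?.getD 0 = h.getLast hne := by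
    rw [List.getLast?_eq_some_getLast hne]; rfl
  have hlen : h.length = h.dropLast.length + 1 := by
    conv_lhs => rw [← hsplit]
    simp
  unfold heappopA
  rw [hlast]
  split_ifs with hre
  · -- the heap had a single element
    have hre' : h.dropLast = [] := List.isEmpty_iff.1 hre
    have hg : h.getD 0 0 = h.getLast hne := by
      conv_lhs => rw [← hsplit, hre']
      rfl
    refine ⟨hg.symm, ?_, ?_⟩
    · show (h.getD 0 0 :: h.dropLast).Perm h
      rw [hre', hg]
      conv_rhs => rw [← hsplit, hre']
      exact List.Perm.refl _
    · show IsHeap h.dropLast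
      intro c hc hc0
      rw [hre'] at hc
      simp at hc
  · have hr0 : 0 < h.dropLast.length := by
      rcases Nat.eq_zero_or_pos h.dropLast.length with h0 | h0
      · exact absurd (List.isEmpty_iff.2 (List.length_eq_zero_iff.1 h0)) hre
      · exact h0
    have hget0 : h.dropLast.getD 0 0 = h.getD 0 0 := by
      conv_rhs => rw [← hsplit]
      rw [List.getD_append _ _ _ _ hr0]
    have ha0len : (h.dropLast.set 0 (h.getLast hne)).length = h.dropLast.length := by simp
    have hni : (h.dropLast.set 0 (h.getLast hne)).getD 0 0 = h.getLast hne := by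
      rw [getD_set, if_pos ⟨rfl, hr0⟩]
    -- the value of every non-root slot of the working array is the h value
    have hval : ∀ x, x ≠ 0 → x < h.dropLast.length →
        (h.dropLast.set 0 (h.getLast hne)).getD x 0 = h.getD x 0 := by
      intro x hx hxl
      rw [getD_set, if_neg (by omega)]
      conv_rhs => rw [← hsplit]
      rw [List.getD_append _ _ _ _ hxl]
    constructor
    · exact hget0
    constructor
    · -- permutation claim
      have hperm : (siftupLoopA (h.dropLast.set 0 (h.getLast hne))
          (h.dropLast.set 0 (h.getLast hne)).length
          ((h.dropLast.set 0 (h.getLast hne)).getD 0 0) 0).Perm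
          (h.dropLast.set 0 (h.getLast hne)) := by
        have := siftupLoopA_perm ((h.dropLast.set 0 (h.getLast hne)).length)
          (h.dropLast.set 0 (h.getLast hne))
          ((h.dropLast.set 0 (h.getLast hne)).getD 0 0) 0 (by omega) (by omega)
        rw [hni, List.set_set] at this
        rw [hni]
        exact this
      unfold siftupA
      refine (List.Perm.cons _ hperm).trans ?_
      conv_rhs => rw [← hsplit]
      rw [List.perm_iff_count]
      intro x
      have hc := count_set h.dropLast 0 hr0 (h.getLast hne) x
      rw [hget0] at hc
      simp only [List.count_cons, List.count_append, List.count_singleton]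
      by_cases hx1 : h.getD 0 0 = x <;> by_cases hx2 : h.getLast hne = x <;>
        simp [hx1, hx2] at hc ⊢ <;> omega
    · -- the new array is again a heap
      unfold siftupA
      refine siftupLoopA_heap ((h.dropLast.set 0 (h.getLast hne)).length)
        (h.dropLast.set 0 (h.getLast hne)) _ 0 (by omega) (by omega) ?_ ?_
      · intro c hc hc0 hcp hq
        rw [ha0len] at hc
        rw [hval _ (by omega) (by omega), hval _ (by omega) hc]
        exact hh c (by omega) hc0
      · intro c hc hc0 hq h00
        omega

theorem insertSortedB_perm (s : List Int) (n : Int) : (insertSortedB s n).Perm (n :: s) := by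
  induction s with
  | nil => simp [insertSortedB]
  | cons x xs ih =>
    simp only [insertSortedB]
    split
    · exact ((ih.cons x).trans (List.Perm.swap n x xs))
    · exact List.Perm.refl _

theorem insertSortedB_sorted (s : List Int) (n : Int) (hs : s.Pairwise (· ≤ ·)) :
    (insertSortedB s n).Pairwise (· ≤ ·) := by
  induction s with
  | nil => simp [insertSortedB]
  | cons x xs ih =>
    simp only [insertSortedB]
    rcases List.pairwise_cons.1 hs with ⟨hx, hxs⟩
    split_ifs with hxn
    · refine List.pairwise_cons.2 ⟨?_, ih hxs⟩
      intro b hb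
      rcases List.mem_cons.1 ((insertSortedB_perm xs n).mem_iff.1 hb) with h | h
      · omega
      · exact hx b h
    · refine List.pairwise_cons.2 ⟨?_, hs⟩
      intro b hb
      rcases List.mem_cons.1 hb with h | h
      · omega
      · exact le_trans (show n ≤ x by omega) (hx b h)

theorem fold_eq (nums : List Int) : ∀ (ans hp pl : List Int),
    hp.Perm pl → IsHeap hp → pl.Pairwise (· ≤ ·) →
    (nums.foldl stepA (ans, hp)).1 = (nums.foldl stepB (ans, pl)).1 := by
  induction nums with
  | nil => intro ans hp pl _ _ _; rfl
  | cons n ns ih =>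
    intro ans hp pl hperm hheap hsorted
    rw [List.foldl_cons, List.foldl_cons]
    by_cases hn : n = 0
    · subst hn
      by_cases hpe : hp = []
      · have hple : pl = [] := (hpe ▸ hperm).nil_eq.symm
        subst hpe; subst hple
        have hsA : stepA (ans, ([] : List Int)) 0 = (ans ++ [0], []) := rfl
        have hsB : stepB (ans, ([] : List Int)) 0 = (ans ++ [0], []) := rfl
        rw [hsA, hsB]
        exact ih (ans ++ [0]) [] [] hperm hheap hsorted
      · have hple : pl ≠ [] := fun e => hpe ((e ▸ hperm).eq_nil)
        obtain ⟨x, xs, hx⟩ := List.exists_cons_of_ne_nil hple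
        obtain ⟨h1, h2, h3⟩ := heappopA_spec hp hpe hheap
        -- the heap root equals the head of the sorted list
        have hx_min : ∀ b ∈ pl, x ≤ b := by
          intro b hb
          rw [hx] at hb hsorted
          rcases List.mem_cons.1 hb with hb | hb
          · omega
          · exact (List.pairwise_cons.1 hsorted).1 b hb
        have hp0mem : hp.getD 0 0 ∈ pl := by
          refine hperm.mem_iff.1 ?_
          have h0l : 0 < hp.length := by
            cases hp with
            | nil => exact absurd rfl hpe
            | cons a l => simp
          rw [List.getD_eq_getElem hp 0 h0l]
          exact List.getElem_mem h0l
        have hxmem : x ∈ hp := hperm.mem_iff.2 (by rw [hx]; exact List.mem_cons_self)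
        have hle0 : hp.getD 0 0 ≤ x := by
          obtain ⟨i, hi, hie⟩ := List.mem_iff_getElem.1 hxmem
          have hm := heap_root_min hp hheap i hi
          rwa [List.getD_eq_getElem hp 0 hi, hie] at hm
        have hroot : hp.getD 0 0 = x := le_antisymm hle0 (hx_min _ hp0mem)
        have hstepA : stepA (ans, hp) 0 = (ans ++ [hp.getD 0 0], (heappopA hp).2) := by
          unfold stepA
          rw [if_pos rfl, if_neg (by simpa [List.isEmpty_iff] using hpe)]
          show (ans ++ [(heappopA hp).1], (heappopA hp).2) = _
          rw [h1]
        have hstepB : stepB (ans, pl) 0 = (ans ++ [x], xs) := by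
          unfold stepB
          rw [if_pos rfl, hx]
        rw [hstepA, hstepB, hroot]
        refine ih _ _ _ ?_ h3 ?_
        · -- (heappopA hp).2 ~ xs
          have : (hp.getD 0 0 :: (heappopA hp).2).Perm (x :: xs) := h2.trans (hx ▸ hperm)
          rw [hroot] at this
          exact this.cons_inv
        · rw [hx] at hsorted
          exact (List.pairwise_cons.1 hsorted).2
    · have hstepA : stepA (ans, hp) n = (ans, heappushA hp n) := by
        simp only [stepA, if_neg hn]
      have hstepB : stepB (ans, pl) n = (ans, insertSortedB pl n) := by
        simp only [stepB, if_neg hn]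
      rw [hstepA, hstepB]
      exact ih _ _ _
        ((heappushA_perm hp n).trans ((hperm.cons n).trans (insertSortedB_perm pl n).symm))
        (heappushA_heap hp n hheap) (insertSortedB_sorted pl n hsorted)

-- ===== VERDICT (by name: the statement is the Claim_ definition above) =====
theorem solution_spec : Claim_equal_solution := by
  intro nums _
  unfold Spec_solution solution solution_alt
  exact fold_eq nums [] [] [] (List.Perm.refl _) (by intro c hc h0; simp at hc) (by simp)
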